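-- pv_equiv track=rewrite | github.com/enferas/qtimigration | tags/pyslet-0.2.20110608/pyslet/rfc2396.py | RelativizeSegments
-- ===== SOURCE A (Python) =====
-- def RelativizeSegments(pathSegments,baseSegments):
-- 	result=[]
-- 	pos=0
-- 	while pos<len(baseSegments):
-- 		if result:
-- 			result=['..']+result
-- 		else:
-- 			if pos>=len(pathSegments) or baseSegments[pos]!=pathSegments[pos]:
-- 				result=result+pathSegments[pos:]
-- 		pos=pos+1
-- 	if not result and len(pathSegments)>len(baseSegments):
-- 		# full match but pathSegments is longer
-- 		return pathSegments[len(baseSegments)-1:]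
-- 	elif result==['']:
-- 		return ['.']+result
-- 	else:
-- 		return result
-- ===== SOURCE B (Python) =====
-- def RelativizeSegments(pathSegments, baseSegments):
--     # Find first index where base and path disagree (one linear pass),
--     # then build the result directly: O(n) instead of A's repeated list copies.
--     k = 0
--     while k < len(baseSegments) and k < len(pathSegments) and baseSegments[k] == pathSegments[k]:
--         k += 1
--     if k == len(baseSegments):
--         # base fully matched
--         if len(pathSegments) > len(baseSegments):
--             return pathSegments[len(baseSegments) - 1:]
--         return []
--     tail = pathSegments[k:]
--     if not tail:
--         return []
--     result = ['..'] * (len(baseSegments) - 1 - k) + tail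
--     if result == ['']:
--         return ['.', '']
--     return result
-- ===== Notes on version B (the rewrite author's own statement) =====
-- stated objective: faster
-- what changed: A rebuilds the result list inside the loop (['..']+result each iteration, plus a quadratic-in-the-worst-case list rebuild pattern); B finds the first mismatch index in one comparison pass and constructs ['..']*(len(base)-1-k)+path[k:] directly.
import Mathlib
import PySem

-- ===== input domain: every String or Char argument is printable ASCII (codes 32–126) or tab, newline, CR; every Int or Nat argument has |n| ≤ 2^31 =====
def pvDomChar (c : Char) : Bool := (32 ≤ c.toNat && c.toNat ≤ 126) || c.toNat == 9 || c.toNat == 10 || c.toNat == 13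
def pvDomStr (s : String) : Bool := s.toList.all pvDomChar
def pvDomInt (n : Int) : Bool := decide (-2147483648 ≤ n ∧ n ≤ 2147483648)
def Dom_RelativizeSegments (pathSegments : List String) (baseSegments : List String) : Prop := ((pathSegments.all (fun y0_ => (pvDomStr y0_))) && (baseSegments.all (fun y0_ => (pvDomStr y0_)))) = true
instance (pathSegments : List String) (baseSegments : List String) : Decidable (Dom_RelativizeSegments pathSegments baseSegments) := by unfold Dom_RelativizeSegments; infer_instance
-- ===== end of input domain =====

-- B replaces A's per-iteration list rebuilding with a single first-mismatch scan and one direct construction (objective: faster).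

-- ===== PORT A =====
-- the while loop of A: state = (pos, result); indexing uses getD (exact: pos < baseSegments.length in that branch);
-- pathSegments[pos:] with pos ≥ 0 is List.drop pos (exact for a nonnegative index)
def RelALoop (path base : List String) (pos : Nat) (result : List String) : List String :=
  if pos < base.length then
    RelALoop path base (pos + 1)
      (if result ≠ [] then ".." :: result
       else if pos ≥ path.length ∨ base.getD pos "" ≠ path.getD pos "" then
         result ++ path.drop pos
       else result)
  else result
termination_by base.length - pos

def RelativizeSegments (pathSegments : List String) (baseSegments : List String) : List String :=
  let result := RelALoop pathSegments baseSegments 0 []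
  if result = [] ∧ pathSegments.length > baseSegments.length then
    -- pathSegments[len(baseSegments)-1:] — the start may be -1 (empty base), so use the Python slice primitive
    PySem.List.slice pathSegments (some ((baseSegments.length : Int) - 1)) none
  else if result = [""] then
    "." :: result
  else result

-- ===== PORT B =====
-- B's while loop: advance k while both lists are in range and agree at k
def MismatchIdx (path base : List String) (k : Nat) : Nat :=
  if k < base.length ∧ k < path.length ∧ base.getD k "" = path.getD k "" then
    MismatchIdx path base (k + 1)
  else k
termination_by base.length - k

def RelativizeSegments_alt (pathSegments : List String) (baseSegments : List String) : List String :=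
  let k := MismatchIdx pathSegments baseSegments 0
  if k = baseSegments.length then
    if pathSegments.length > baseSegments.length then
      PySem.List.slice pathSegments (some ((baseSegments.length : Int) - 1)) none
    else []
  else
    let tail := PySem.List.slice pathSegments (some (k : Int)) none
    if tail = [] then []
    else
      let r := List.replicate (baseSegments.length - 1 - k) ".." ++ tail
      if r = [""] then [".", ""] else r

-- ===== PRECONDITION & SPEC =====
def Spec_RelativizeSegments (pathSegments : List String) (baseSegments : List String) (out : List String) : Prop := out = RelativizeSegments_alt pathSegments baseSegments
instance (pathSegments : List String) (baseSegments : List String) (out : List String) : Decidable (Spec_RelativizeSegments pathSegments baseSegments out) := by unfold Spec_RelativizeSegments; infer_instance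

-- ===== CLAIM (what is proved, stated in full; the proofs are below) =====
def Claim_equal_RelativizeSegments : Prop := ∀ (pathSegments : List String) (baseSegments : List String), Dom_RelativizeSegments pathSegments baseSegments → Spec_RelativizeSegments pathSegments baseSegments (RelativizeSegments pathSegments baseSegments)

-- ===== LEMMAS AND PROOFS =====

-- once the accumulator is nonempty, each remaining iteration just prepends ".."
lemma relALoop_nonempty (path base : List String) :
    ∀ (n pos : Nat) (r : List String), base.length - pos = n → r ≠ [] →
      RelALoop path base pos r = List.replicate (base.length - pos) ".." ++ r := by
  intro n
  induction n with
  | zero =>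
    intro pos r hn _
    rw [RelALoop, if_neg (by omega), hn]
    simp
  | succ m ih =>
    intro pos r hn hr
    have hpos : pos < base.length := by omega
    rw [RelALoop, if_pos hpos, if_pos hr]
    rw [ih (pos + 1) (".." :: r) (by omega) (by simp)]
    have : base.length - pos = (base.length - (pos + 1)) + 1 := by omega
    rw [this, List.replicate_succ']
    simp

-- if the path is exhausted the accumulator stays empty
lemma relALoop_exhausted (path base : List String) :
    ∀ (n pos : Nat), base.length - pos = n → path.length ≤ pos →
      RelALoop path base pos [] = [] := by
  intro n
  induction n with
  | zero =>
    intro pos hn hp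
    rw [RelALoop]
    simp
    omega
  | succ m ih =>
    intro pos hn hp
    have hpos : pos < base.length := by omega
    rw [RelALoop, if_pos hpos]
    simp only [ne_eq, not_true_eq_false, if_false, List.nil_append]
    rw [if_pos (Or.inl hp), List.drop_eq_nil_of_le hp]
    exact ih (pos + 1) (by omega) (by omega)

-- characterisation of A's loop via B's mismatch index
lemma relALoop_eq (path base : List String) :
    ∀ (n pos : Nat), base.length - pos = n → pos ≤ base.length →
      RelALoop path base pos [] =
        (let k := MismatchIdx path base pos
         if k = base.length then []
         else if path.drop k = [] then []
         else List.replicate (base.length - 1 - k) ".." ++ path.drop k) := by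
  intro n
  induction n with
  | zero =>
    intro pos hn hle
    have hpos : pos = base.length := by omega
    rw [RelALoop, MismatchIdx]
    simp [hpos]
  | succ m ih =>
    intro pos hn hle
    have hpos : pos < base.length := by omega
    by_cases hmatch : pos < path.length ∧ base.getD pos "" = path.getD pos ""
    · -- segments agree at pos: both loops advance
      have hA : RelALoop path base pos [] = RelALoop path base (pos + 1) [] := by
        rw [RelALoop, if_pos hpos]
        simp only [ne_eq, not_true_eq_false, if_false]
        rw [if_neg (by push Not; exact hmatch)]
      have hM : MismatchIdx path base pos = MismatchIdx path base (pos + 1) := by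
        rw [MismatchIdx, if_pos ⟨hpos, hmatch⟩]
      rw [hA, hM]
      exact ih (pos + 1) (by omega) (by omega)
    · -- first mismatch at pos
      have hk : MismatchIdx path base pos = pos := by
        rw [MismatchIdx, if_neg]; intro h; exact hmatch ⟨h.2.1, h.2.2⟩
      have hcond : pos ≥ path.length ∨ base.getD pos "" ≠ path.getD pos "" := by
        by_cases h : pos < path.length
        · push Not at hmatch; exact Or.inr (hmatch h)
        · exact Or.inl (by omega)
      rw [RelALoop, if_pos hpos]
      simp only [ne_eq, not_true_eq_false, if_false, List.nil_append]
      rw [if_pos hcond]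
      by_cases hdrop : path.drop pos = []
      · rw [hdrop]
        rw [relALoop_exhausted path base (base.length - (pos+1)) (pos+1) rfl
              (by have := List.drop_eq_nil_iff.mp hdrop; omega)]
        simp [hk, hdrop]
      · rw [relALoop_nonempty path base (base.length - (pos+1)) (pos+1) (path.drop pos) rfl hdrop]
        simp only [hk]
        rw [if_neg (by omega), if_neg hdrop]
        congr 2
        omega

-- MismatchIdx stays within the base length
lemma mismatchIdx_le (path base : List String) :
    ∀ (n pos : Nat), base.length - pos = n → pos ≤ base.length →
      MismatchIdx path base pos ≤ base.length := by
  intro n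
  induction n with
  | zero =>
    intro pos hn hle
    rw [MismatchIdx, if_neg (by omega)]
    exact hle
  | succ m ih =>
    intro pos hn hle
    rw [MismatchIdx]
    split
    · exact ih (pos + 1) (by omega) (by omega)
    · exact hle

-- ===== VERDICT (by name: the statement is the Claim_ definition above) =====
theorem RelativizeSegments_spec : Claim_equal_RelativizeSegments := by
  intro path base _
  unfold Spec_RelativizeSegments RelativizeSegments RelativizeSegments_alt
  have hloop := relALoop_eq path base base.length 0 (by omega) (by omega)
  simp only [] at hloop ⊢
  rw [hloop, PySem.List.slice_from_natCast]
  have hkle : MismatchIdx path base 0 ≤ base.length :=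
    mismatchIdx_le path base base.length 0 (by omega) (by omega)
  set k := MismatchIdx path base 0 with hkdef
  by_cases hk : k = base.length
  · rw [if_pos hk, if_pos hk]
    by_cases hgt : path.length > base.length
    · rw [if_pos ⟨rfl, hgt⟩, if_pos hgt]
    · rw [if_neg (by simp [hgt]), if_neg hgt]
      simp
  · rw [if_neg hk, if_neg hk]
    by_cases hd : path.drop k = []
    · have hlt : path.length ≤ k := by
        have := List.drop_eq_nil_iff.mp hd
        omega
      rw [if_pos hd, if_pos hd]
      rw [if_neg (by simp; omega)]
      simp
    · rw [if_neg hd, if_neg hd]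
      have hr : List.replicate (base.length - 1 - k) ".." ++ path.drop k ≠ [] := by
        simp [hd]
      rw [if_neg (by simp [hr])]
      by_cases he : List.replicate (base.length - 1 - k) ".." ++ path.drop k = [""]
      · rw [if_pos he, if_pos he, he]
      · rw [if_neg he, if_neg he]
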